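-- pv_equiv track=rewrite | github.com/thalyssonDEV/Algoritmo-e--Programacao | Aplicação Vetores/vetores_funcionalidades.py | get_position_numbers
-- ===== SOURCE A (Python) =====
-- def get_position_numbers(menor,maior,vetor_atual): ## ARRUMAR
--
--   posicao_maior = 1
--   for char in vetor_atual:
--     if char != maior:
--       posicao_maior += 1
--     else:
--       break
--
--   posicao_menor = 1
--   for char in vetor_atual:
--     if char != menor:
--       posicao_menor += 1
--     else:
--       break
--
--   return posicao_menor,posicao_maior
-- ===== SOURCE B (Python) =====
-- def get_position_numbers(menor, maior, vetor_atual):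
--     # Single back-to-front pass over the enumerated vector computing both
--     # positions at once: the leftmost match overwrites last, so the first
--     # occurrence wins, and an absent value leaves len(vetor_atual) + 1 (like A).
--     pos_menor = pos_maior = len(vetor_atual) + 1
--     for pos, v in reversed(list(enumerate(vetor_atual, 1))):
--         if v == menor:
--             pos_menor = pos
--         if v == maior:
--             pos_maior = pos
--     return pos_menor, pos_maior
-- ===== Notes on version B (the rewrite author's own statement) =====
-- stated objective: alternative
-- what changed: A makes two independent forward scans with counter-and-break; B is one recursive back-to-front pass computing both positions together, where the leftmost match overwrites and absence leaves len+1.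
import Mathlib
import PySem

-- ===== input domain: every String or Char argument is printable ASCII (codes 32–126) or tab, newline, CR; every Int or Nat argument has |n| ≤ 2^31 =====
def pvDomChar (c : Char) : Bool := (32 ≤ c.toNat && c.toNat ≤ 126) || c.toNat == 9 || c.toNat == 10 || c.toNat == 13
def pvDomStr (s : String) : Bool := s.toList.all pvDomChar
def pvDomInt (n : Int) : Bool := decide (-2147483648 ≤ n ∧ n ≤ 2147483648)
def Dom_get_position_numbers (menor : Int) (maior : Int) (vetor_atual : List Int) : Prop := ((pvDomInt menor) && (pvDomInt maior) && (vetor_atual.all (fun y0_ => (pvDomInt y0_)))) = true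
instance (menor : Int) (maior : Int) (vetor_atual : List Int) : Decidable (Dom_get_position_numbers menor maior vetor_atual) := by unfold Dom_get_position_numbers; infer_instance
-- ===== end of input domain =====

-- B replaces A's two forward counter-and-break scans by one recursive back-to-front pass
-- computing both positions together (objective: alternative; same O(n) cost).


-- ===== PORT A =====
-- A's loop: counter starts at 1, increments while the element differs, breaks on match.
def pvLoopA (target : Int) : List Int → Int → Int
  | [], p => p
  | c :: rest, p => if c ≠ target then pvLoopA target rest (p + 1) else p

def get_position_numbers (menor : Int) (maior : Int) (vetor_atual : List Int) : Int × Int :=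
  let posicao_maior := pvLoopA maior vetor_atual 1
  let posicao_menor := pvLoopA menor vetor_atual 1
  (posicao_menor, posicao_maior)

-- ===== PORT B =====
-- B: one backward pass over reversed(list(enumerate(vetor_atual, 1))) updating both positions.
def get_position_numbers_alt (menor : Int) (maior : Int) (vetor_atual : List Int) : Int × Int :=
  (PySem.List.enumerate vetor_atual 1).reverse.foldl
    (fun st p =>
      ((if p.2 = menor then p.1 else st.1),
       (if p.2 = maior then p.1 else st.2)))
    ((vetor_atual.length : Int) + 1, (vetor_atual.length : Int) + 1)

-- ===== PRECONDITION & SPEC =====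
def Spec_get_position_numbers (menor : Int) (maior : Int) (vetor_atual : List Int) (out : Int × Int) : Prop := out = get_position_numbers_alt menor maior vetor_atual
instance (menor : Int) (maior : Int) (vetor_atual : List Int) (out : Int × Int) : Decidable (Spec_get_position_numbers menor maior vetor_atual out) := by unfold Spec_get_position_numbers; infer_instance

-- ===== CLAIM (what is proved, stated in full; the proofs are below) =====
def Claim_equal_get_position_numbers : Prop := ∀ (menor : Int) (maior : Int) (vetor_atual : List Int), Dom_get_position_numbers menor maior vetor_atual → Spec_get_position_numbers menor maior vetor_atual (get_position_numbers menor maior vetor_atual)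

-- ===== LEMMAS AND PROOFS =====
theorem pvFoldr_eq (menor maior : Int) (xs : List Int) (s : Int) :
    List.foldr
      (fun p st =>
        ((if p.2 = menor then p.1 else st.1),
         (if p.2 = maior then p.1 else st.2)))
      (s + (xs.length : Int), s + (xs.length : Int))
      (PySem.List.enumerate xs s)
    = (pvLoopA menor xs s, pvLoopA maior xs s) := by
  induction xs generalizing s with
  | nil => simp [PySem.List.enumerate_nil, pvLoopA]
  | cons x xs ih =>
    have h1 : s + ((x :: xs).length : Int) = (s + 1) + (xs.length : Int) := by
      simp; ring
    rw [PySem.List.enumerate_cons, h1, List.foldr_cons, ih]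
    by_cases hm : x = menor <;> by_cases hM : x = maior <;>
      simp [pvLoopA, hm, hM]

-- ===== VERDICT (by name: the statement is the Claim_ definition above) =====
theorem get_position_numbers_spec : Claim_equal_get_position_numbers := by
  intro menor maior v _
  unfold Spec_get_position_numbers get_position_numbers get_position_numbers_alt
  rw [List.foldl_reverse]
  have h : ((v.length : Int) + 1, (v.length : Int) + 1)
      = ((1 : Int) + (v.length : Int), (1 : Int) + (v.length : Int)) := by
    simp [add_comm]
  rw [h, pvFoldr_eq]
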